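-- pv_equiv track=rewrite | github.com/HBinhCT/Q-project | hackerearth/Data Structures/1-D/Pairs Having Similar Elements/solution.py | SimilarElementsPairs
-- ===== SOURCE A (Python) =====
-- def SimilarElementsPairs(A, N):
--     # Write your code here
--     arr = sorted(A)
--     is_similar = False
--     total = count = 0
--     j = arr[0]
--     for i in arr:
--         if i == j:
--             count += 1
--         elif j + 1 == i:
--             count += 1
--             is_similar = True
--         else:
--             if is_similar:
--                 total += (count * (count - 1)) // 2
--                 is_similar = False
--             count = 1
--         j = i
--     if is_similar:
--         total += (count * (count - 1)) // 2
--     return total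
-- ===== SOURCE B (Python) =====
-- def SimilarElementsPairs(A, N):
--     # No sorting: hash-based chain walking (as in the classic
--     # "longest consecutive sequence" technique).  A chain is a maximal
--     # set of present consecutive values; pairs are counted per chain.
--     freq = {}
--     for x in A:
--         freq[x] = freq.get(x, 0) + 1
--     total = 0
--     for s in freq:
--         if s - 1 in freq:
--             continue  # not a chain start
--         size = 0
--         length = 0
--         k = s
--         while k in freq:
--             size += freq[k]
--             length += 1
--             k += 1
--         if length >= 2:
--             total += size * (size - 1) // 2
--     return total
-- ===== Notes on version B (the rewrite author's own statement) =====
-- stated objective: alternative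
-- what changed: B replaces A's sort-then-sweep state machine by the hash-based chain-walking technique: build a frequency dict, detect each chain start s (s-1 absent), walk s,s+1,... through the dict accumulating multiplicities, and add C(size,2) for chains with at least two distinct values; no sorting is performed.
import Mathlib
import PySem

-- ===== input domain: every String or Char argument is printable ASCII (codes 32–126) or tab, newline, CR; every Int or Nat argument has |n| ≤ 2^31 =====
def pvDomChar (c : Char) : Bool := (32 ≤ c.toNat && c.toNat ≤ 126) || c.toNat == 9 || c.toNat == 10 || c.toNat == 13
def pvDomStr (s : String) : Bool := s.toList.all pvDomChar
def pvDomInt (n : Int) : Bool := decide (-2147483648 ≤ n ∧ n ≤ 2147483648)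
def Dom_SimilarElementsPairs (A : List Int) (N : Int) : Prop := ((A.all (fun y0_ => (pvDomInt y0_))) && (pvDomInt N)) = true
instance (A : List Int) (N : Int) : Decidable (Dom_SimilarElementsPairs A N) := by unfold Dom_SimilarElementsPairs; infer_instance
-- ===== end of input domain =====

-- B replaces A's sort-then-sweep state machine by hash-based chain walking
-- (frequency dict, detect chain starts, walk consecutive present values); no sorting.

-- ===== PORT A =====
-- loop body of A's 'for i in arr' (state: total, count, is_similar, j)
def pvStepA (st : Int × Int × Bool × Int) (i : Int) : Int × Int × Bool × Int :=
  match st with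
  | (total, count, sim, j) =>
    if i == j then (total, count + 1, sim, i)
    else if j + 1 == i then (total, count + 1, true, i)
    else ((if sim then total + PySem.Int.floordiv (count * (count - 1)) 2 else total), 1, false, i)

def SimilarElementsPairs (A : List Int) (N : Int) : Int :=
  let arr := PySem.List.sorted A (fun x => x) false
  match arr with
  | [] => 0   -- unreachable under Pre_: arr[0] raises IndexError on an empty list
  | j0 :: _ =>
    let st := arr.foldl pvStepA (0, 0, false, j0)
    if st.2.2.1 then st.1 + PySem.Int.floordiv (st.2.1 * (st.2.1 - 1)) 2 else st.1

-- ===== PORT B =====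
-- B's 'while k in freq: size += freq[k]; length += 1; k += 1'.  The fuel argument
-- only makes the loop total in Lean: the walk visits distinct keys of freq, so
-- freq.keys.length steps always reach a value absent from freq (or exhaust the keys).
def pvWalk (freq : PySem.Dict Int Int) (fuel : Nat) (k size len : Int) : Int × Int :=
  match fuel with
  | 0 => (size, len)
  | Nat.succ fuel' =>
    match freq.get? k with
    | none => (size, len)
    | some c => pvWalk freq fuel' (k + 1) (size + c) (len + 1)

def SimilarElementsPairs_alt (A : List Int) (N : Int) : Int :=
  let freq := A.foldl (fun d x => d.insert x (d.getD x 0 + 1)) PySem.Dict.empty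
  freq.keys.foldl (fun total s =>
    if freq.contains (s - 1) then total   -- 'continue': not a chain start
    else
      let sl := pvWalk freq freq.keys.length s 0 0
      if 2 ≤ sl.2 then total + PySem.Int.floordiv (sl.1 * (sl.1 - 1)) 2 else total) 0

-- ===== PRECONDITION & SPEC =====
-- Pre_ excludes only the empty list, on which A raises IndexError (arr[0]).
def Pre_SimilarElementsPairs (A : List Int) (N : Int) : Prop := A ≠ []
instance (A : List Int) (N : Int) : Decidable (Pre_SimilarElementsPairs A N) := by unfold Pre_SimilarElementsPairs; infer_instance
def pvWitness_SimilarElementsPairs : List Int × Int := ([1, 2, 2, 4], 4)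
def Spec_SimilarElementsPairs (A : List Int) (N : Int) (out : Int) : Prop := out = SimilarElementsPairs_alt A N
instance (A : List Int) (N : Int) (out : Int) : Decidable (Spec_SimilarElementsPairs A N out) := by unfold Spec_SimilarElementsPairs; infer_instance

-- ===== CLAIM (what is proved, stated in full; the proofs are below) =====
def Claim_equal_SimilarElementsPairs : Prop := ∀ (A : List Int) (N : Int), Dom_SimilarElementsPairs A N → Pre_SimilarElementsPairs A N → Spec_SimilarElementsPairs A N (SimilarElementsPairs A N)

-- ===== LEMMAS AND PROOFS =====

-- ---- chain vocabulary (proof-only) ----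
-- the keys a, a+1, …, a+L-1 of one chain
def pvChainKeys (a : Int) (L : Nat) : List Int := (List.range L).map (fun i : Nat => a + (i : Int))
def pvChainSum (m : Int → Int) (a : Int) (L : Nat) : Int := ((pvChainKeys a L).map m).sum
def pvChainsFlatten (cs : List (Int × Nat)) : List Int := cs.flatMap (fun c => pvChainKeys c.1 c.2)
-- chains are nonempty, start no earlier than lb, and are separated by gaps > 1
def pvChainsOK : Int → List (Int × Nat) → Prop
  | _, [] => True
  | lb, c :: cs => lb ≤ c.1 ∧ 1 ≤ c.2 ∧ pvChainsOK (c.1 + (c.2 : Int) + 1) cs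
-- the answer: C(size,2) for every chain with ≥ 2 distinct values
def pvChainsTotal (m : Int → Int) (cs : List (Int × Nat)) : Int :=
  (cs.map (fun c => if 2 ≤ (c.2 : Int) then PySem.Int.floordiv (pvChainSum m c.1 c.2 * (pvChainSum m c.1 c.2 - 1)) 2 else 0)).sum
-- greedy chain decomposition of a strictly increasing key list
def pvToChains : List Int → List (Int × Nat)
  | [] => []
  | k :: rest =>
    match pvToChains rest with
    | [] => [(k, 1)]
    | (a, L) :: cs => if a = k + 1 then (k, L + 1) :: cs else (k, 1) :: (a, L) :: cs

theorem pvChainsFlatten_cons (c : Int × Nat) (cs : List (Int × Nat)) :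
    pvChainsFlatten (c :: cs) = pvChainKeys c.1 c.2 ++ pvChainsFlatten cs := by
  unfold pvChainsFlatten
  rw [List.flatMap_cons]

theorem pvChainKeys_succ (a : Int) (L : Nat) : pvChainKeys a (L + 1) = a :: pvChainKeys (a + 1) L := by
  unfold pvChainKeys
  rw [List.range_succ_eq_map, List.map_cons, List.map_map]
  refine List.cons_eq_cons.mpr ⟨by norm_num, ?_⟩
  apply List.map_congr_left
  intro i _
  simp only [Function.comp_apply]
  push_cast
  ring

theorem pvMem_chainKeys (x a : Int) (L : Nat) : x ∈ pvChainKeys a L ↔ a ≤ x ∧ x < a + L := by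
  unfold pvChainKeys
  constructor
  · intro hx
    obtain ⟨i, hi, rfl⟩ := List.mem_map.mp hx
    have := List.mem_range.mp hi
    omega
  · rintro ⟨h1, h2⟩
    exact List.mem_map.mpr ⟨(x - a).toNat, List.mem_range.mpr (by omega), by omega⟩

theorem pvChainSum_succ (m : Int → Int) (a : Int) (L : Nat) :
    pvChainSum m a (L + 1) = m a + pvChainSum m (a + 1) L := by
  simp [pvChainSum, pvChainKeys_succ]

theorem pvChainKeys_nodup (a : Int) (L : Nat) : (pvChainKeys a L).Nodup := by
  unfold pvChainKeys
  exact List.Nodup.map (fun i j h => by omega) List.nodup_range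

-- every element of a chain list lies at or above the lower bound
theorem pvFlatten_lb (cs : List (Int × Nat)) (lb : Int) (h : pvChainsOK lb cs) :
    ∀ x ∈ pvChainsFlatten cs, lb ≤ x := by
  induction cs generalizing lb with
  | nil => intro x hx; simp [pvChainsFlatten] at hx
  | cons c cs ih =>
    obtain ⟨h1, h2, h3⟩ := h
    intro x hx
    rw [pvChainsFlatten_cons] at hx
    rcases List.mem_append.mp hx with hx | hx
    · have := (pvMem_chainKeys x c.1 c.2).mp hx; omega
    · have := ih (c.1 + (c.2 : Int) + 1) h3 x hx; omega

theorem pvChainsOK_start_lb (cs : List (Int × Nat)) (lb : Int) (h : pvChainsOK lb cs) :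
    ∀ c ∈ cs, lb ≤ c.1 := by
  induction cs generalizing lb with
  | nil => intro c hc; exact absurd hc (List.not_mem_nil)
  | cons d cs ih =>
    intro c hc
    rcases List.mem_cons.mp hc with rfl | hc
    · exact h.1
    · have := ih _ h.2.2 c hc
      have h1 := h.1
      have h2 := h.2.1
      omega

-- the membership facts each chain needs: its keys are present, the key before its
-- start and the key after its end are absent
theorem pvChainFacts (cs : List (Int × Nat)) (lb : Int) (h : pvChainsOK lb cs) :
    ∀ c ∈ cs, (∀ j : Nat, j < c.2 → (c.1 + (j : Int)) ∈ pvChainsFlatten cs) ∧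
      (c.1 - 1 ∉ pvChainsFlatten cs) ∧ (c.1 + (c.2 : Int) ∉ pvChainsFlatten cs) := by
  induction cs generalizing lb with
  | nil => intro c hc; simp at hc
  | cons d cs ih =>
    obtain ⟨h1, h2, h3⟩ := h
    intro c hc
    have hmemApp : ∀ x, x ∈ pvChainsFlatten (d :: cs) ↔ x ∈ pvChainKeys d.1 d.2 ∨ x ∈ pvChainsFlatten cs := by
      intro x; rw [pvChainsFlatten_cons]; exact List.mem_append
    rcases List.mem_cons.mp hc with rfl | hc
    · refine ⟨?_, ?_, ?_⟩
      · intro j hj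
        exact (hmemApp _).mpr (Or.inl ((pvMem_chainKeys _ _ _).mpr (by constructor <;> omega)))
      · intro hx
        rcases (hmemApp _).mp hx with hx | hx
        · have := (pvMem_chainKeys _ _ _).mp hx; omega
        · have := pvFlatten_lb cs _ h3 _ hx; omega
      · intro hx
        rcases (hmemApp _).mp hx with hx | hx
        · have := (pvMem_chainKeys _ _ _).mp hx; omega
        · have := pvFlatten_lb cs _ h3 _ hx; omega
    · obtain ⟨hin, hl, hr⟩ := ih (d.1 + (d.2 : Int) + 1) h3 c hc
      have hclb : d.1 + (d.2 : Int) + 1 ≤ c.1 := pvChainsOK_start_lb cs _ h3 c hc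
      refine ⟨?_, ?_, ?_⟩
      · intro j hj
        exact (hmemApp _).mpr (Or.inr (hin j hj))
      · intro hx
        rcases (hmemApp _).mp hx with hx | hx
        · have := (pvMem_chainKeys _ _ _).mp hx; omega
        · exact hl hx
      · intro hx
        rcases (hmemApp _).mp hx with hx | hx
        · have := (pvMem_chainKeys _ _ _).mp hx; omega
        · exact hr hx

-- ---- pvToChains correctness ----
theorem pvToChains_pos (ks : List Int) : ∀ c ∈ pvToChains ks, 1 ≤ c.2 := by
  induction ks with
  | nil => intro c hc; simp [pvToChains] at hc
  | cons k rest ih =>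
    intro c hc
    simp only [pvToChains] at hc
    cases hrest : pvToChains rest with
    | nil => rw [hrest] at hc; simp at hc; simp [hc]
    | cons p cs =>
      rw [hrest] at hc
      obtain ⟨a, L⟩ := p
      by_cases hcase : a = k + 1
      · simp only [hcase, if_pos rfl] at hc
        rcases List.mem_cons.mp hc with rfl | hc
        · simp
        · exact ih c (by rw [hrest]; exact List.mem_cons_of_mem _ hc)
      · simp only [if_neg hcase] at hc
        rcases List.mem_cons.mp hc with rfl | hc
        · simp
        · exact ih c (by rw [hrest]; exact hc)

theorem pvToChains_flatten (ks : List Int) : pvChainsFlatten (pvToChains ks) = ks := by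
  induction ks with
  | nil => rfl
  | cons k rest ih =>
    simp only [pvToChains]
    cases hrest : pvToChains rest with
    | nil =>
      rw [hrest] at ih
      have hr : rest = [] := by simpa [pvChainsFlatten] using ih.symm
      subst hr
      simp [pvChainsFlatten, pvChainKeys, List.range_one]
    | cons p cs =>
      rw [hrest] at ih
      obtain ⟨a, L⟩ := p
      by_cases hcase : a = k + 1
      · simp only [if_pos hcase]
        rw [pvChainsFlatten_cons] at ih ⊢
        rw [pvChainKeys_succ, List.cons_append]
        rw [hcase] at ih
        exact congrArg (List.cons k) ih
      · simp only [if_neg hcase]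
        rw [pvChainsFlatten_cons]
        rw [show pvChainKeys k 1 = [k] by simp [pvChainKeys, List.range_one], ih]
        rfl

theorem pvToChains_ok (ks : List Int) (h : ks.Pairwise (· < ·)) :
    ∀ lb, (∀ x ∈ ks, lb ≤ x) → pvChainsOK lb (pvToChains ks) := by
  induction ks with
  | nil => intro lb _; trivial
  | cons k rest ih =>
    intro lb hlb
    have hk : ∀ x ∈ rest, k < x := (List.pairwise_cons.mp h).1
    have hrestp : rest.Pairwise (· < ·) := (List.pairwise_cons.mp h).2
    have hihk := ih hrestp (k + 1) (fun x hx => by have := hk x hx; omega)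
    simp only [pvToChains]
    cases hrest : pvToChains rest with
    | nil => exact ⟨hlb k (by simp), by norm_num, trivial⟩
    | cons p cs =>
      rw [hrest] at hihk
      obtain ⟨a, L⟩ := p
      obtain ⟨ha1, ha2, ha3⟩ := hihk
      by_cases hcase : a = k + 1
      · simp only [if_pos hcase]
        refine ⟨hlb k (by simp), by omega, ?_⟩
        have : k + ((L + 1 : Nat) : Int) + 1 = a + (L : Int) + 1 := by subst hcase; push_cast; ring
        rw [this]; exact ha3
      · simp only [if_neg hcase]
        refine ⟨hlb k (by simp), le_refl 1, ?_, ha2, ha3⟩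
        -- a ≥ k+2: a > k (a is the head of rest) and a ≠ k+1
        have hahead : a ∈ rest := by
          have := pvToChains_flatten rest
          rw [hrest] at this
          have hmem : a ∈ pvChainsFlatten ((a, L) :: cs) := by
            rw [pvChainsFlatten_cons, List.mem_append]
            exact Or.inl ((pvMem_chainKeys _ _ _).mpr (by constructor <;> [omega; (push_cast; omega)]))
          rw [this] at hmem; exact hmem
        have := hk a hahead
        push_cast
        omega

-- ---- the walk computes one chain's size and length ----
theorem pvWalk_spec (freq : PySem.Dict Int Int) (L : Nat) :
    ∀ (fuel : Nat) (a size len : Int), L ≤ fuel →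
    (∀ j : Nat, j < L → freq.get? (a + (j : Int)) = some (freq.getD (a + (j : Int)) 0)) →
    (freq.get? (a + (L : Int)) = none ∨ fuel = L) →
    pvWalk freq fuel a size len = (size + pvChainSum (fun k => freq.getD k 0) a L, len + L) := by
  induction L with
  | zero =>
    intro fuel a size len _ _ hend
    have hz : pvChainSum (fun k => freq.getD k 0) a 0 = 0 := by simp [pvChainSum, pvChainKeys]
    cases fuel with
    | zero => simp [pvWalk, hz]
    | succ f =>
      rcases hend with hend | hend
      · simp only [pvWalk]
        rw [show a + ((0 : Nat) : Int) = a by push_cast; ring] at hend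
        rw [hend]; simp [hz]
      · omega
  | succ L ih =>
    intro fuel a size len hfuel hmem hend
    obtain ⟨f, rfl⟩ : ∃ f, fuel = f + 1 := ⟨fuel - 1, by omega⟩
    have h0 := hmem 0 (by omega)
    rw [show a + ((0 : Nat) : Int) = a by push_cast; ring] at h0
    simp only [pvWalk, h0]
    rw [ih f (a + 1) (size + freq.getD a 0) (len + 1) (by omega)
      (fun j hj => by
        have := hmem (j + 1) (by omega)
        rw [show a + ((j + 1 : Nat) : Int) = a + 1 + (j : Int) by push_cast; ring] at this
        exact this)
      (by
        rcases hend with hend | hend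
        · left
          rw [show a + 1 + (L : Int) = a + ((L + 1 : Nat) : Int) by push_cast; ring]
          exact hend
        · right; omega)]
    rw [pvChainSum_succ]
    simp only [Prod.mk.injEq]
    constructor
    · ring
    · push_cast; ring

-- ---- B's per-key contribution ----
def pvG (freq : PySem.Dict Int Int) (fuel : Nat) (s : Int) : Int :=
  if freq.contains (s - 1) then 0
  else
    let sl := pvWalk freq fuel s 0 0
    if 2 ≤ sl.2 then PySem.Int.floordiv (sl.1 * (sl.1 - 1)) 2 else 0

theorem pvFold_body_eq (freq : PySem.Dict Int Int) (fuel : Nat) (t s : Int) :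
    (if freq.contains (s - 1) then t
     else
       let sl := pvWalk freq fuel s 0 0
       if 2 ≤ sl.2 then t + PySem.Int.floordiv (sl.1 * (sl.1 - 1)) 2 else t)
      = t + pvG freq fuel s := by
  unfold pvG
  cases h : freq.contains (s - 1)
  · simp only [h, Bool.false_eq_true, if_false]
    split_ifs <;> simp
  · simp [h]

-- the facts pvG needs about one chain, phrased on freq only
def pvFactsK (freq : PySem.Dict Int Int) (fuel : Nat) (c : Int × Nat) : Prop :=
  1 ≤ c.2 ∧ c.2 ≤ fuel ∧ freq.get? (c.1 - 1) = none ∧ freq.get? (c.1 + (c.2 : Int)) = none ∧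
    (∀ j : Nat, j < c.2 → freq.get? (c.1 + (j : Int)) = some (freq.getD (c.1 + (j : Int)) 0))

-- Σ pvG over one chain's keys = that chain's contribution
theorem pvSumG_chain (freq : PySem.Dict Int Int) (fuel : Nat) (a : Int) (L : Nat)
    (hf : pvFactsK freq fuel (a, L)) :
    ((pvChainKeys a L).map (pvG freq fuel)).sum
      = if 2 ≤ (L : Int) then PySem.Int.floordiv (pvChainSum (fun k => freq.getD k 0) a L * (pvChainSum (fun k => freq.getD k 0) a L - 1)) 2 else 0 := by
  obtain ⟨h1, h2, h3, h4, h5⟩ := hf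
  obtain ⟨L', rfl⟩ : ∃ L', L = L' + 1 := ⟨L - 1, by omega⟩
  rw [pvChainKeys_succ, List.map_cons, List.sum_cons]
  have htail : ((pvChainKeys (a + 1) L').map (pvG freq fuel)).sum = 0 := by
    apply List.sum_eq_zero
    intro x hx
    obtain ⟨y, hy, rfl⟩ := List.mem_map.mp hx
    have hy' := (pvMem_chainKeys _ _ _).mp hy
    have hprev : freq.get? (y - 1) = some (freq.getD (y - 1) 0) := by
      have := h5 (y - 1 - a).toNat (by push_cast at hy' ⊢; omega)
      rw [show a + ((y - 1 - a).toNat : Int) = y - 1 by push_cast at hy' ⊢; omega] at this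
      exact this
    have hcont : freq.contains (y - 1) = true := by
      rw [PySem.Dict.contains_eq_isSome_get?, hprev]; rfl
    simp [pvG, hcont]
  rw [htail]
  have hcont0 : freq.contains (a - 1) = false := by
    rw [PySem.Dict.contains_eq_isSome_get?, h3]; rfl
  have hwalk := pvWalk_spec freq (L' + 1) fuel a 0 0 h2 h5 (Or.inl h4)
  simp only [pvG, hcont0, if_false, Bool.false_eq_true, hwalk]
  push_cast
  split_ifs with hc1 hc2 hc2 <;> [skip; omega; omega; skip] <;> simp

-- Σ pvG over the flatten = Σ chain contributions
theorem pvSumG (freq : PySem.Dict Int Int) (fuel : Nat) (cs : List (Int × Nat))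
    (hf : ∀ c ∈ cs, pvFactsK freq fuel c) :
    ((pvChainsFlatten cs).map (pvG freq fuel)).sum = pvChainsTotal (fun k => freq.getD k 0) cs := by
  induction cs with
  | nil => simp [pvChainsFlatten, pvChainsTotal]
  | cons c cs ih =>
    rw [pvChainsFlatten_cons, List.map_append, List.sum_append,
      pvSumG_chain freq fuel c.1 c.2 (hf c (by simp)),
      ih (fun d hd => hf d (List.mem_cons_of_mem _ hd))]
    simp only [pvChainsTotal, List.map_cons, List.sum_cons]

-- ---- A's sweep (already reduced to pvRunB over distinct keys) = chain totals ----
-- loop body of the distinct-key sweep (state: total, run_size, similar, prev); m = multiplicity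
def pvStepB (m : Int) (st : Int × Int × Bool × Int) (k : Int) : Int × Int × Bool × Int :=
  match st with
  | (total, run, sim, prev) =>
    if k == prev then (total, run + m, sim, k)
    else if k == prev + 1 then (total, run + m, true, k)
    else ((if sim then total + PySem.Int.floordiv (run * (run - 1)) 2 else total), m, false, k)

def pvRunA (s : List Int) : Int :=
  match s with
  | [] => 0
  | j0 :: _ =>
    let st := s.foldl pvStepA (0, 0, false, j0)
    if st.2.2.1 then st.1 + PySem.Int.floordiv (st.2.1 * (st.2.1 - 1)) 2 else st.1

def pvRunB (m : Int → Int) (ks : List Int) : Int :=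
  match ks with
  | [] => 0
  | k0 :: _ =>
    let st := ks.foldl (fun st k => pvStepB (m k) st k) (0, 0, false, k0)
    if st.2.2.1 then st.1 + PySem.Int.floordiv (st.2.1 * (st.2.1 - 1)) 2 else st.1

-- A's loop over a block of n copies of the current value v only increments count n times.
theorem pvFoldA_replicate (n : Nat) (total count : Int) (sim : Bool) (v : Int) :
    List.foldl pvStepA (total, count, sim, v) (List.replicate n v) = (total, count + n, sim, v) := by
  induction n generalizing count with
  | zero => simp
  | succ k ih =>
    rw [List.replicate_succ, List.foldl_cons]
    have hstep : pvStepA (total, count, sim, v) v = (total, count + 1, sim, v) := by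
      simp [pvStepA]
    rw [hstep, ih]
    simp only [Prod.mk.injEq, true_and, and_true]
    push_cast
    omega

-- A's loop over a whole block of n ≥ 1 copies of v equals one distinct-key step with multiplicity n.
theorem pvFoldA_block (n : Nat) (hn : 1 ≤ n) (total count : Int) (sim : Bool) (j v : Int) :
    List.foldl pvStepA (total, count, sim, j) (List.replicate n v) =
      pvStepB (n : Int) (total, count, sim, j) v := by
  obtain ⟨m, rfl⟩ : ∃ m, n = m + 1 := ⟨n - 1, by omega⟩
  rw [List.replicate_succ, List.foldl_cons]
  by_cases h1 : v = j
  · subst h1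
    have hstep : pvStepA (total, count, sim, v) v = (total, count + 1, sim, v) := by
      simp [pvStepA]
    have hstepB : pvStepB ((m + 1 : Nat) : Int) (total, count, sim, v) v
        = (total, count + ((m + 1 : Nat) : Int), sim, v) := by
      simp [pvStepB]
    rw [hstep, hstepB, pvFoldA_replicate]
    simp only [Prod.mk.injEq, true_and, and_true]
    push_cast
    omega
  · have hb1 : (v == j) = false := by simp [h1]
    by_cases h2 : j + 1 = v
    · have hb2 : (j + 1 == v) = true := by simp [h2]
      have hb2' : (v == j + 1) = true := by simp [beq_iff_eq]; omega
      have hstep : pvStepA (total, count, sim, j) v = (total, count + 1, true, v) := by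
        simp [pvStepA, hb1, hb2]
      have hstepB : pvStepB ((m + 1 : Nat) : Int) (total, count, sim, j) v
          = (total, count + ((m + 1 : Nat) : Int), true, v) := by
        simp [pvStepB, hb1, hb2']
      rw [hstep, hstepB, pvFoldA_replicate]
      simp only [Prod.mk.injEq, true_and, and_true]
      push_cast
      omega
    · have hb2 : (j + 1 == v) = false := by simp [h2]
      have hb2' : (v == j + 1) = false := by simp [beq_iff_eq]; omega
      have hstep : pvStepA (total, count, sim, j) v
          = ((if sim then total + PySem.Int.floordiv (count * (count - 1)) 2 else total), 1, false, v) := by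
        simp [pvStepA, hb1, hb2]
      have hstepB : pvStepB ((m + 1 : Nat) : Int) (total, count, sim, j) v
          = ((if sim then total + PySem.Int.floordiv (count * (count - 1)) 2 else total),
             ((m + 1 : Nat) : Int), false, v) := by
        simp [pvStepB, hb1, hb2']
      rw [hstep, hstepB, pvFoldA_replicate]
      simp only [Prod.mk.injEq, true_and, and_true]
      push_cast
      omega

-- A's fold over the concatenation of blocks = the distinct-key fold with multiplicities.
theorem pvFoldA_flatMap (ks : List Int) (m : Int → Nat) (hm : ∀ k ∈ ks, 1 ≤ m k)
    (st : Int × Int × Bool × Int) :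
    List.foldl pvStepA st (List.flatMap (fun k => List.replicate (m k) k) ks) =
      List.foldl (fun st k => pvStepB ((m k : Nat) : Int) st k) st ks := by
  induction ks generalizing st with
  | nil => simp
  | cons k kt ih =>
    obtain ⟨total, count, sim, j⟩ := st
    rw [List.flatMap_cons, List.foldl_append, List.foldl_cons,
      pvFoldA_block (m k) (hm k (by simp)) total count sim j k]
    exact ih (fun x hx => hm x (by simp [hx])) _

-- a Pairwise-≤ list is the concatenation, block by block, of replicated copies of
-- the members of any strictly increasing list with the same membership.
theorem pvSorted_decomp (s ks : List Int) (hs : s.Pairwise (· ≤ ·))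
    (hks : ks.Pairwise (· < ·)) (hmem : ∀ x, x ∈ ks ↔ x ∈ s) :
    s = List.flatMap (fun k => List.replicate (List.count k s) k) ks := by
  induction s generalizing ks with
  | nil =>
    cases ks with
    | nil => simp
    | cons a t => exact absurd ((hmem a).mp (by simp)) (by simp)
  | cons v t ih =>
    have hvt : ∀ x ∈ t, v ≤ x := fun x hx => (List.pairwise_cons.mp hs).1 x hx
    have ht : t.Pairwise (· ≤ ·) := (List.pairwise_cons.mp hs).2
    obtain ⟨k0, kt, rfl⟩ : ∃ k0 kt, ks = k0 :: kt := by
      cases ks with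
      | nil => exact absurd ((hmem v).mpr (by simp)) (by simp)
      | cons a t' => exact ⟨a, t', rfl⟩
    have hk0v : k0 = v := by
      rcases List.mem_cons.mp ((hmem k0).mp (by simp)) with h | h
      · exact h
      · have h1 : v ≤ k0 := hvt k0 h
        rcases List.mem_cons.mp ((hmem v).mpr (by simp)) with h2 | h2
        · omega
        · have := (List.pairwise_cons.mp hks).1 v h2; omega
    subst hk0v
    have hktgt : ∀ x ∈ kt, k0 < x := (List.pairwise_cons.mp hks).1
    have hktp : kt.Pairwise (· < ·) := (List.pairwise_cons.mp hks).2
    have hcongr : (List.flatMap (fun k => List.replicate (List.count k (k0 :: t)) k) kt)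
        = List.flatMap (fun k => List.replicate (List.count k t) k) kt := by
      apply List.flatMap_congr
      intro k hk
      have hne : k0 ≠ k := by have := hktgt k hk; omega
      simp [List.count_cons, hne]
    by_cases hvmem : k0 ∈ t
    · have hmem' : ∀ x, x ∈ k0 :: kt ↔ x ∈ t := by
        intro x; constructor
        · intro hx
          rcases List.mem_cons.mp hx with rfl | hx
          · exact hvmem
          · rcases List.mem_cons.mp ((hmem x).mp (by simp [hx])) with rfl | h
            · exact hvmem
            · exact h
        · intro hx; exact (hmem x).mpr (by simp [hx])
      have hih := ih (k0 :: kt) ht hks hmem'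
      rw [List.flatMap_cons] at hih ⊢
      have hcount : List.count k0 (k0 :: t) = List.count k0 t + 1 := by
        simp [List.count_cons]
      rw [hcount, List.replicate_succ, hcongr, List.cons_append]
      exact congrArg (List.cons k0) hih
    · have hmem' : ∀ x, x ∈ kt ↔ x ∈ t := by
        intro x; constructor
        · intro hx
          have hxne : x ≠ k0 := by have := hktgt x hx; omega
          rcases List.mem_cons.mp ((hmem x).mp (by simp [hx])) with h | h
          · exact absurd h hxne
          · exact h
        · intro hx
          rcases List.mem_cons.mp ((hmem x).mpr (by simp [hx])) with h | h
          · exact absurd (h ▸ hx) hvmem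
          · exact h
      have hih := ih kt ht hktp hmem'
      rw [List.flatMap_cons]
      have hcount : List.count k0 (k0 :: t) = 1 := by
        simp [List.count_eq_zero_of_not_mem hvmem]
      rw [hcount, hcongr]
      simpa using congrArg (List.cons k0) hih

theorem pvBridge (s ks : List Int) (m : Int → Int)
    (hsle : s.Pairwise (· ≤ ·)) (hkslt : ks.Pairwise (· < ·))
    (hmem : ∀ x, x ∈ ks ↔ x ∈ s)
    (hm : ∀ k ∈ ks, m k = (List.count k s : Int)) :
    pvRunA s = pvRunB m ks := by
  have hdecomp := pvSorted_decomp s ks hsle hkslt hmem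
  cases ks with
  | nil =>
    cases hs : s with
    | nil => rfl
    | cons v t => exact absurd ((hmem v).mpr (by simp [hs])) (by simp)
  | cons k0 kt =>
    have hk0s : k0 ∈ s := (hmem k0).mp (by simp)
    obtain ⟨p, hp⟩ : ∃ p, List.count k0 s = p + 1 :=
      ⟨List.count k0 s - 1, by have := List.count_pos_iff.mpr hk0s; omega⟩
    have hshape : s = k0 :: (List.replicate p k0 ++
        List.flatMap (fun k => List.replicate (List.count k s) k) kt) := by
      conv_lhs => rw [hdecomp]
      rw [List.flatMap_cons, hp, List.replicate_succ, List.cons_append]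
    have hcounts : ∀ k ∈ k0 :: kt, 1 ≤ List.count k s :=
      fun k hk => List.count_pos_iff.mpr ((hmem k).mp hk)
    have hfold : List.foldl pvStepA ((0 : Int), (0 : Int), false, k0) s =
        List.foldl (fun st k => pvStepB (m k) st k) ((0 : Int), (0 : Int), false, k0) (k0 :: kt) := by
      conv_lhs => rw [hdecomp]
      rw [pvFoldA_flatMap (k0 :: kt) (fun k => List.count k s) hcounts]
      exact PySem.List.foldl_congr_mem _ _ _ _ (fun acc k hk => by rw [hm k hk])
    rw [hshape]
    simp only [pvRunA, pvRunB]
    rw [← hshape, hfold]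

-- the sweep over one chain's tail (every key = prev + 1) just accumulates the run
theorem pvFold_chain_tail (m : Int → Int) (L : Nat) :
    ∀ (a t r : Int) (sim : Bool),
    List.foldl (fun st k => pvStepB (m k) st k) (t, r, sim, a) (pvChainKeys (a + 1) L)
      = (t, r + pvChainSum m (a + 1) L, (sim || decide (1 ≤ L)), a + L) := by
  induction L with
  | zero =>
    intro a t r sim
    simp [pvChainKeys, pvChainSum]
  | succ L ih =>
    intro a t r sim
    rw [pvChainKeys_succ, List.foldl_cons]
    have hstep : pvStepB (m (a + 1)) (t, r, sim, a) (a + 1) = (t, r + m (a + 1), true, a + 1) := by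
      have hne : (a + 1 == a) = false := by simp
      simp [pvStepB, hne]
    rw [hstep, ih (a + 1) t (r + m (a + 1)) true]
    rw [pvChainSum_succ]
    simp only [Prod.mk.injEq]
    refine ⟨by trivial, by ring, ?_, by push_cast; ring⟩
    have h1L : decide (1 ≤ L + 1) = true := by simp
    rw [h1L]
    simp

-- finishing step shared by the sweep lemmas
def pvFinish (st : Int × Int × Bool × Int) : Int :=
  if st.2.2.1 then st.1 + PySem.Int.floordiv (st.2.1 * (st.2.1 - 1)) 2 else st.1

-- the sweep over whole chains, entered after a gap (prev ≤ lb - 2)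
theorem pvFold_chains (m : Int → Int) (cs : List (Int × Nat)) :
    ∀ (lb : Int), pvChainsOK lb cs → ∀ (t r prev : Int) (sim : Bool), prev ≤ lb - 2 →
    pvFinish (List.foldl (fun st k => pvStepB (m k) st k) (t, r, sim, prev) (pvChainsFlatten cs))
      = (if sim then t + PySem.Int.floordiv (r * (r - 1)) 2 else t) + pvChainsTotal m cs := by
  induction cs with
  | nil =>
    intro lb _ t r prev sim _
    simp [pvChainsFlatten, pvChainsTotal, pvFinish]
  | cons c cs ih =>
    intro lb hok t r prev sim hprev
    obtain ⟨a, L⟩ := c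
    obtain ⟨h1, h2, h3⟩ := hok
    have ha : lb ≤ a := h1
    have hL1 : 1 ≤ L := h2
    have hok' : pvChainsOK (a + (L : Int) + 1) cs := h3
    obtain ⟨L', rfl⟩ : ∃ L', L = L' + 1 := ⟨L - 1, by omega⟩
    rw [pvChainsFlatten_cons, pvChainKeys_succ, List.cons_append, List.foldl_cons]
    have hne1 : (a == prev) = false := beq_eq_false_iff_ne.mpr (by omega)
    have hne2 : (a == prev + 1) = false := beq_eq_false_iff_ne.mpr (by omega)
    have hstep : pvStepB (m a) (t, r, sim, prev) a
        = ((if sim then t + PySem.Int.floordiv (r * (r - 1)) 2 else t), m a, false, a) := by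
      simp [pvStepB, hne1, hne2]
    rw [hstep, List.foldl_append, pvFold_chain_tail m L' a _ (m a) false]
    have hprev' : a + (L' : Int) ≤ (a + ((L' + 1 : Nat) : Int) + 1) - 2 := by push_cast; omega
    rw [ih (a + ((L' + 1 : Nat) : Int) + 1) hok'
      (if sim then t + PySem.Int.floordiv (r * (r - 1)) 2 else t)
      (m a + pvChainSum m (a + 1) L') (a + (L' : Int)) (false || decide (1 ≤ L')) hprev']
    have htot : pvChainsTotal m ((a, L' + 1) :: cs)
        = (if 2 ≤ ((L' + 1 : Nat) : Int) then PySem.Int.floordiv ((m a + pvChainSum m (a + 1) L') * (m a + pvChainSum m (a + 1) L' - 1)) 2 else 0) + pvChainsTotal m cs := by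
      simp only [pvChainsTotal, List.map_cons, List.sum_cons]
      rw [← pvChainSum_succ]
    rw [htot]
    by_cases hL : 1 ≤ L'
    · have hd : (false || decide (1 ≤ L')) = true := by simp [hL]
      rw [hd, if_pos rfl, if_pos (show (2 : Int) ≤ ((L' + 1 : Nat) : Int) by push_cast; omega)]
      ring
    · have hL0 : L' = 0 := by omega
      subst hL0
      have hd : (false || decide (1 ≤ 0)) = false := by simp
      rw [hd, if_neg (show ¬(false = true) by decide),
        if_neg (show ¬((2 : Int) ≤ ((0 + 1 : Nat) : Int)) by decide)]
      try ring

-- the full sweep = chain totals (first chain entered with prev = its own start)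
theorem pvRunB_chains (m : Int → Int) (cs : List (Int × Nat)) (lb : Int) (hok : pvChainsOK lb cs) :
    pvRunB m (pvChainsFlatten cs) = pvChainsTotal m cs := by
  cases cs with
  | nil => simp [pvChainsFlatten, pvRunB, pvChainsTotal]
  | cons c cs =>
    obtain ⟨a, L⟩ := c
    obtain ⟨h1, h2, h3⟩ := hok
    have hL1 : 1 ≤ L := h2
    have hok' : pvChainsOK (a + (L : Int) + 1) cs := h3
    obtain ⟨L', rfl⟩ : ∃ L', L = L' + 1 := ⟨L - 1, by omega⟩
    have hflat : pvChainsFlatten ((a, L' + 1) :: cs)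
        = a :: (pvChainKeys (a + 1) L' ++ pvChainsFlatten cs) := by
      rw [pvChainsFlatten_cons, pvChainKeys_succ, List.cons_append]
    rw [hflat]
    show pvFinish (List.foldl (fun st k => pvStepB (m k) st k) (0, 0, false, a)
      (a :: (pvChainKeys (a + 1) L' ++ pvChainsFlatten cs))) = _
    rw [List.foldl_cons]
    have hstep : pvStepB (m a) ((0 : Int), (0 : Int), false, a) a = (0, m a, false, a) := by
      simp [pvStepB]
    rw [hstep, List.foldl_append, pvFold_chain_tail m L' a 0 (m a) false]
    have hprev' : a + (L' : Int) ≤ (a + ((L' + 1 : Nat) : Int) + 1) - 2 := by push_cast; omega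
    rw [pvFold_chains m cs (a + ((L' + 1 : Nat) : Int) + 1) hok'
      0 (m a + pvChainSum m (a + 1) L') (a + (L' : Int)) (false || decide (1 ≤ L')) hprev']
    have htot : pvChainsTotal m ((a, L' + 1) :: cs)
        = (if 2 ≤ ((L' + 1 : Nat) : Int) then PySem.Int.floordiv ((m a + pvChainSum m (a + 1) L') * (m a + pvChainSum m (a + 1) L' - 1)) 2 else 0) + pvChainsTotal m cs := by
      simp only [pvChainsTotal, List.map_cons, List.sum_cons]
      rw [← pvChainSum_succ]
    rw [htot]
    by_cases hL : 1 ≤ L'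
    · have hd : (false || decide (1 ≤ L')) = true := by simp [hL]
      rw [hd, if_pos rfl, if_pos (show (2 : Int) ≤ ((L' + 1 : Nat) : Int) by push_cast; omega)]
      ring
    · have hL0 : L' = 0 := by omega
      subst hL0
      have hd : (false || decide (1 ≤ 0)) = false := by simp
      rw [hd, if_neg (show ¬(false = true) by decide),
        if_neg (show ¬((2 : Int) ≤ ((0 + 1 : Nat) : Int)) by decide)]
      try ring


-- ===== VERDICT (by name: the statement is the Claim_ definition above) =====
theorem SimilarElementsPairs_spec : Claim_equal_SimilarElementsPairs := by
  intro A N _ _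
  unfold Spec_SimilarElementsPairs
  show SimilarElementsPairs A N = SimilarElementsPairs_alt A N
  -- names
  set freq := PySem.Dict.counter A with hfreq
  set ks := PySem.List.sorted (PySem.Set.ofList A) (fun x => x) false with hks
  set m : Int → Int := fun k => freq.getD k 0 with hm
  set cs := pvToChains ks with hcs
  -- membership bridge: present in freq ↔ member of ks
  have hmemks : ∀ x, x ∈ ks ↔ x ∈ A := fun x => by
    rw [hks, PySem.List.mem_sorted, PySem.Set.mem_ofList]
  have hkeys : freq.keys = PySem.Set.ofList A := PySem.Dict.keys_counter A
  have hget : ∀ x, (freq.get? x = none) ↔ x ∉ ks := by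
    intro x
    rw [PySem.Dict.get?_eq_none_iff_not_mem_keys, hkeys, PySem.Set.mem_ofList, hmemks]
  have hgetSome : ∀ x, x ∈ ks → freq.get? x = some (freq.getD x 0) := by
    intro x hx
    rcases ho : freq.get? x with _ | v
    · exact absurd hx ((hget x).mp ho)
    · rw [PySem.Dict.getD_eq_get?_getD, ho]
      rfl
  have hkslt : ks.Pairwise (· < ·) := PySem.List.sorted_ofList_pairwise_lt A
  have hflat : pvChainsFlatten cs = ks := pvToChains_flatten ks
  -- ChainsOK for cs, with the trivially small bound min over ks (use flatten + head)
  have hok : ∃ lb, pvChainsOK lb cs := by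
    cases hksc : ks with
    | nil => exact ⟨0, by simp [hcs, hksc, pvToChains, pvChainsOK]⟩
    | cons k0 kt =>
      refine ⟨k0, ?_⟩
      rw [hcs, hksc]
      apply pvToChains_ok _ (hksc ▸ hkslt)
      intro x hx
      rcases List.mem_cons.mp hx with rfl | hx
      · omega
      · have := (List.pairwise_cons.mp (hksc ▸ hkslt)).1 x hx; omega
  obtain ⟨lb, hok⟩ := hok
  -- per-chain facts in freq form
  have hfuel : ks.length = freq.keys.length := by
    rw [hkeys, hks]
    exact (PySem.List.sorted_perm _ _ _).length_eq
  have hfacts : ∀ c ∈ cs, pvFactsK freq freq.keys.length c := by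
    intro c hc
    obtain ⟨hin, hl, hr⟩ := pvChainFacts cs lb hok c hc
    have hpos : 1 ≤ c.2 := (pvToChains_pos ks c (hcs ▸ hc))
    have hsub : pvChainKeys c.1 c.2 ⊆ ks := by
      intro x hx
      have hx' := (pvMem_chainKeys _ _ _).mp hx
      have : x ∈ pvChainsFlatten cs := by
        have := hin (x - c.1).toNat (by omega)
        rw [show c.1 + ((x - c.1).toNat : Int) = x by omega] at this
        exact this
      rw [hflat] at this; exact this
    have hlen : c.2 ≤ freq.keys.length := by
      rw [← hfuel]
      have hnd : ks.Nodup := hkslt.imp (fun h => ne_of_lt h) |>.imp id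
      calc c.2 = (pvChainKeys c.1 c.2).length := by simp [pvChainKeys]
        _ ≤ ks.length := ((pvChainKeys_nodup c.1 c.2).subperm hsub).length_le
    refine ⟨hpos, hlen, ?_, ?_, ?_⟩
    · exact (hget _).mpr (fun hx => hl (hflat ▸ hx))
    · exact (hget _).mpr (fun hx => hr (hflat ▸ hx))
    · intro j hj
      exact hgetSome _ (hflat ▸ hin j hj)
  -- ===== A side =====
  have hA : SimilarElementsPairs A N = pvRunA (PySem.List.sorted A (fun x => x) false) := rfl
  have hAB : pvRunA (PySem.List.sorted A (fun x => x) false) = pvRunB m ks := by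
    refine pvBridge (PySem.List.sorted A (fun x => x) false) ks m
      (PySem.List.sorted_pairwise A (fun x => x)) hkslt
      (fun x => by rw [hmemks, PySem.List.mem_sorted])
      (fun k hk => by
        show (PySem.Dict.counter A).getD k 0
            = ((PySem.List.sorted A (fun x => x) false).count k : Int)
        rw [PySem.Dict.getD_counter,
          (PySem.List.sorted_perm A (fun x => x) false).count_eq k])
  have hArun : SimilarElementsPairs A N = pvChainsTotal m cs := by
    rw [hA, hAB, ← hflat, pvRunB_chains m cs lb hok]
  -- ===== B side =====
  have hBfold : SimilarElementsPairs_alt A N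
      = freq.keys.foldl (fun total s => total + pvG freq freq.keys.length s) 0 := by
    unfold SimilarElementsPairs_alt
    simp only [PySem.Dict.foldl_insert_getD_add_one_eq_counter]
    refine PySem.List.foldl_congr_mem _ _ _ _ (fun acc s _ => ?_)
    exact pvFold_body_eq freq freq.keys.length acc s
  have hBsum : SimilarElementsPairs_alt A N = ((freq.keys.map (pvG freq freq.keys.length)).sum) := by
    rw [hBfold, PySem.List.foldl_add]
    ring
  have hperm : freq.keys.Perm ks := by
    rw [hkeys, hks]
    exact (PySem.List.sorted_perm _ _ _).symm
  have hB : SimilarElementsPairs_alt A N = pvChainsTotal m cs := by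
    rw [hBsum, (hperm.map (pvG freq freq.keys.length)).sum_eq, ← hflat]
    exact pvSumG freq freq.keys.length cs hfacts
  rw [hArun, hB]
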